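-- pv_equiv track=rewrite | github.com/SithminiThennakoon/KLN_Timetable | backend/app/services/enrollment_inference.py | _split_assignment_count
-- ===== SOURCE A (Python) =====
-- def _split_assignment_count(group_sizes: list[int], limit: int | None) -> int:
--     if not group_sizes:
--         return 1
--     total = sum(group_sizes)
--     if not limit or total <= limit:
--         return 1
--
--     split_count = 0
--     current_total = 0
--     for size in sorted(group_sizes):
--         remaining = int(size)
--         while remaining > 0:
--             available = limit - current_total
--             if current_total > 0 and available == 0:
--                 split_count += 1
--                 current_total = 0
--                 available = limit
--             fragment_size = min(remaining, available)
--             current_total += fragment_size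
--             remaining -= fragment_size
--             if current_total >= limit:
--                 split_count += 1
--                 current_total = 0
--
--     if current_total > 0:
--         split_count += 1
--     return max(1, split_count)
-- ===== SOURCE B (Python) =====
-- def _split_assignment_count(group_sizes: list[int], limit: int | None) -> int:
--     if not group_sizes:
--         return 1
--     total = sum(group_sizes)
--     if not limit or total <= limit:
--         return 1
--     positive = sum(s for s in group_sizes if s > 0)
--     return max(1, -(-positive // limit))
-- ===== Notes on version B (the rewrite author's own statement) =====
-- stated objective: faster
-- what changed: Replaces the sort plus per-unit fragment-packing loop by a closed form: bins filled to exact capacity make the split count ceil(sum_of_positive_sizes/limit), computed with integer arithmetic in one pass.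
import Mathlib
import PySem

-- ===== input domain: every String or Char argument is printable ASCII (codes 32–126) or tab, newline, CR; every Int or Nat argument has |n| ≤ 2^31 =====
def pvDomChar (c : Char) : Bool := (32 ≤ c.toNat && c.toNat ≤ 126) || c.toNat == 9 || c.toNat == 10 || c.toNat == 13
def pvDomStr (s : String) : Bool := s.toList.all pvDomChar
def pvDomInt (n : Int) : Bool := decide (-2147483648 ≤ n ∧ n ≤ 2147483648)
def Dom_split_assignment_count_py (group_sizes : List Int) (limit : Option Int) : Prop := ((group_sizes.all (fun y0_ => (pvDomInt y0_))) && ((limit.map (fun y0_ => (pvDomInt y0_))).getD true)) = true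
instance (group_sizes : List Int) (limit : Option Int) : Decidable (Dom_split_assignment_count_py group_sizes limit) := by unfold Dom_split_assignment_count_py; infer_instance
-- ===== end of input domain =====

-- B replaces A's sort + per-fragment bin-packing loop by the closed form
-- ceil(sum-of-positive-sizes / limit) computed with integer arithmetic (faster: asymptotic).


-- ===== PORT A =====
-- the inner `while remaining > 0` loop; fuel = remaining.toNat suffices (each pass
-- consumes at least one unit whenever limit ≥ 1); state = (current_total, split_count)
def pvWhileA : Nat → Int → Int → Int → Int → Int × Int
  | 0, _, _, ct, sc => (ct, sc)
  | f+1, l, r, ct, sc =>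
    if r > 0 then
      let avail := l - ct
      let t1 : Int × Int × Int := if ct > 0 ∧ avail = 0 then (sc + 1, 0, l) else (sc, ct, avail)
      let frag := min r t1.2.2
      let ct2 := t1.2.1 + frag
      let r2 := r - frag
      let t2 : Int × Int := if ct2 ≥ l then (t1.1 + 1, 0) else (t1.1, ct2)
      pvWhileA f l r2 t2.2 t2.1
    else (ct, sc)

-- the `for size in sorted(group_sizes)` loop
def pvForA (l : Int) : List Int → Int × Int → Int × Int
  | [], st => st
  | s :: rest, st => pvForA l rest (pvWhileA s.toNat l s st.1 st.2)

def split_assignment_count_py (group_sizes : List Int) (limit : Option Int) : Int :=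
  if group_sizes = [] then 1
  else
    let total := group_sizes.sum
    match limit with
    | none => 1                          -- `not limit` truthiness: None
    | some l =>
      if l = 0 then 1                    -- `not limit` truthiness: 0
      else if total ≤ l then 1
      else
        let st := pvForA l (PySem.List.sorted group_sizes (fun x => x) false) (0, 0)
        let sc := if st.1 > 0 then st.2 + 1 else st.2
        max 1 sc

-- ===== PORT B =====
def split_assignment_count_py_alt (group_sizes : List Int) (limit : Option Int) : Int :=
  if group_sizes = [] then 1
  else
    let total := group_sizes.sum
    match limit with
    | none => 1
    | some l =>
      if l = 0 then 1
      else if total ≤ l then 1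
      else
        let positive := (group_sizes.filter (fun s => decide (0 < s))).sum
        max 1 (-(PySem.Int.floordiv (-positive) l))

-- ===== PRECONDITION & SPEC =====
-- Pre_ excludes exactly the inputs where Python A never returns: with a negative limit,
-- a total above it and some positive size, A's while loop runs forever (available < 0
-- makes `remaining` grow); A returns on every other input.
def Pre_split_assignment_count_py (group_sizes : List Int) (limit : Option Int) : Prop :=
  (limit.all (fun l =>
    decide (0 ≤ l) || decide (group_sizes.sum ≤ l) || group_sizes.all (fun s => decide (s ≤ 0)))) = true

instance (group_sizes : List Int) (limit : Option Int) : Decidable (Pre_split_assignment_count_py group_sizes limit) := by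
  unfold Pre_split_assignment_count_py; infer_instance

def pvWitness_split_assignment_count_py : List Int × Option Int := ([7, 7, 7], some 5)

def Spec_split_assignment_count_py (group_sizes : List Int) (limit : Option Int) (out : Int) : Prop := out = split_assignment_count_py_alt group_sizes limit
instance (group_sizes : List Int) (limit : Option Int) (out : Int) : Decidable (Spec_split_assignment_count_py group_sizes limit out) := by unfold Spec_split_assignment_count_py; infer_instance

-- ===== CLAIM (what is proved, stated in full; the proofs are below) =====
def Claim_equal_split_assignment_count_py : Prop := ∀ (group_sizes : List Int) (limit : Option Int), Dom_split_assignment_count_py group_sizes limit → Pre_split_assignment_count_py group_sizes limit → Spec_split_assignment_count_py group_sizes limit (split_assignment_count_py group_sizes limit)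

-- ===== LEMMAS AND PROOFS =====

-- the while loop keeps 0 ≤ current_total < limit and conserves
-- split_count * limit + current_total + remaining-to-do
theorem pvWhileA_spec (fuel : Nat) : ∀ (l r ct sc : Int), 1 ≤ l → 0 ≤ ct → ct < l →
    r.toNat ≤ fuel →
    0 ≤ (pvWhileA fuel l r ct sc).1 ∧ (pvWhileA fuel l r ct sc).1 < l ∧
      (pvWhileA fuel l r ct sc).2 * l + (pvWhileA fuel l r ct sc).1 = sc * l + ct + max r 0 := by
  induction fuel with
  | zero =>
    intro l r ct sc hl hct0 hctl hr
    have : max r 0 = 0 := by omega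
    simp [pvWhileA, this]
    constructor
    · omega
    · omega
  | succ f ih =>
    intro l r ct sc hl hct0 hctl hr
    by_cases hrpos : r > 0
    · have hdead : ¬ (ct > 0 ∧ l - ct = 0) := by omega
      simp only [pvWhileA, if_pos hrpos, if_neg hdead]
      set frag := min r (l - ct) with hfrag
      have hf1 : 1 ≤ frag := le_min (by omega) (by omega)
      have hfr : frag ≤ r := min_le_left _ _
      have hfa : frag ≤ l - ct := min_le_right _ _
      have hr2 : (r - frag).toNat ≤ f := by omega
      by_cases hfull : ct + frag ≥ l
      · have hceq : ct + frag = l := by omega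
        simp only [if_pos hfull]
        obtain ⟨h1, h2, h3⟩ := ih l (r - frag) 0 (sc + 1) hl (le_refl 0) (by omega) hr2
        refine ⟨h1, h2, ?_⟩
        have hm1 : max (r - frag) 0 = r - frag := by omega
        have hm2 : max r 0 = r := by omega
        have he : (sc + 1) * l = sc * l + l := by ring
        rw [hm1] at h3
        rw [hm2]
        linarith [h3]
      · simp only [if_neg hfull]
        obtain ⟨h1, h2, h3⟩ := ih l (r - frag) (ct + frag) sc hl (by omega) (by omega) hr2
        refine ⟨h1, h2, ?_⟩
        have hm1 : max (r - frag) 0 = r - frag := by omega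
        have hm2 : max r 0 = r := by omega
        rw [hm1] at h3
        rw [hm2]
        linarith [h3]
    · have : max r 0 = 0 := by omega
      simp [pvWhileA, if_neg hrpos, this]
      constructor
      · omega
      · omega

-- the for loop accumulates the sum of the positive parts
theorem pvForA_spec (xs : List Int) : ∀ (l ct sc : Int), 1 ≤ l → 0 ≤ ct → ct < l →
    0 ≤ (pvForA l xs (ct, sc)).1 ∧ (pvForA l xs (ct, sc)).1 < l ∧
      (pvForA l xs (ct, sc)).2 * l + (pvForA l xs (ct, sc)).1
        = sc * l + ct + (xs.map (fun s => max s 0)).sum := by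
  induction xs with
  | nil => intro l ct sc hl h0 h1; refine ⟨h0, h1, ?_⟩; simp [pvForA]
  | cons s rest ih =>
    intro l ct sc hl h0 h1
    obtain ⟨w1, w2, w3⟩ := pvWhileA_spec s.toNat l s ct sc hl h0 h1 (le_refl _)
    simp only [pvForA]
    obtain ⟨r1, r2, r3⟩ := ih l (pvWhileA s.toNat l s ct sc).1 (pvWhileA s.toNat l s ct sc).2 hl w1 w2
    refine ⟨r1, r2, ?_⟩
    simp only [List.map_cons, List.sum_cons]
    rw [r3, w3]
    ring

-- when every size is ≤ 0 the for loop never moves (fuel s.toNat = 0)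
theorem pvForA_nonpos (l : Int) (xs : List Int) (h : ∀ s ∈ xs, s ≤ 0) (st : Int × Int) :
    pvForA l xs st = st := by
  induction xs generalizing st with
  | nil => simp [pvForA]
  | cons s rest ih =>
    have hs : s ≤ 0 := h s (List.mem_cons_self)
    have : s.toNat = 0 := by omega
    simp only [pvForA, this, pvWhileA]
    exact ih (fun x hx => h x (List.mem_cons_of_mem _ hx)) st

theorem possum_eq_filter (xs : List Int) :
    (xs.map (fun s => max s 0)).sum = (xs.filter (fun s => decide (0 < s))).sum := by
  induction xs with
  | nil => simp
  | cons s rest ih =>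
    by_cases hs : 0 < s
    · simp [hs, ih]; omega
    · simp [hs, ih]; omega

-- ===== VERDICT (by name: the statement is the Claim_ definition above) =====
theorem split_assignment_count_py_spec : Claim_equal_split_assignment_count_py := by
  intro gs limit _ hpre
  unfold Spec_split_assignment_count_py split_assignment_count_py split_assignment_count_py_alt
  by_cases hnil : gs = []
  · simp [hnil]
  · simp only [if_neg hnil]
    match limit with
    | none => rfl
    | some l =>
      by_cases hl0 : l = 0
      · simp [hl0]
      · simp only [if_neg hl0]
        by_cases htot : gs.sum ≤ l
        · simp [htot]
        · simp only [if_neg htot]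
          unfold Pre_split_assignment_count_py at hpre
          simp [Option.all_some, htot] at hpre
          have hcases : 0 ≤ l ∨ ∀ s ∈ gs, s ≤ 0 := by
            rcases hpre with h | h
            · exact Or.inl h
            · exact Or.inr h
          rcases hcases with hlpos | hneg
          · -- main case: 1 ≤ l
            have hl1 : 1 ≤ l := by omega
            set xs := PySem.List.sorted gs (fun x => x) false with hxs
            obtain ⟨h1, h2, h3⟩ := pvForA_spec xs l 0 0 hl1 (le_refl 0) (by omega)
            set ct := (pvForA l xs (0, 0)).1
            set sc := (pvForA l xs (0, 0)).2
            have hperm : xs.Perm gs := PySem.List.sorted_perm gs (fun x => x) false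
            have hsum : (xs.map (fun s => max s 0)).sum = (gs.map (fun s => max s 0)).sum :=
              (hperm.map (fun s => max s 0)).sum_eq
            set P := (gs.filter (fun s => decide (0 < s))).sum with hP
            have hPeq : sc * l + ct = P := by
              rw [h3, hsum, possum_eq_filter]; ring
            have hq : -(PySem.Int.floordiv (-P) l)
                = (if ct > 0 then sc + 1 else sc) := by
              rw [PySem.Int.neg_floordiv_neg_eq_iff_of_pos (by omega)]
              by_cases hct : ct > 0
              · simp only [if_pos hct]
                constructor
                · nlinarith
                · nlinarith
              · simp only [if_neg hct]
                have : ct = 0 := by omega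
                constructor
                · nlinarith
                · nlinarith
            simp only [hq]
          · -- l < 0 (or any l) with all sizes ≤ 0: both sides are 1
            have hxs : ∀ s ∈ PySem.List.sorted gs (fun x => x) false, s ≤ 0 := by
              intro s hs
              exact hneg s ((PySem.List.mem_sorted gs (fun x => x) false s).1 hs)
            rw [pvForA_nonpos l _ hxs]
            have hfil : gs.filter (fun s => decide (0 < s)) = [] := by
              rw [List.filter_eq_nil_iff]
              intro s hs
              simpa using not_lt.mpr (hneg s hs)
            simp [hfil, PySem.Int.floordiv]
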